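-- pv_equiv track=rewrite | github.com/Scorpi000/QuantStudio | QuantStudio/Tools/SQLDBFun.py | genSQLInCondition
-- ===== SOURCE A (Python) =====
-- def genSQLInCondition(field_name, range_list, is_str=True, max_num=1000):
--     nStr = len(range_list)
--     if nStr<=max_num:
--         if is_str:
--             return field_name +" IN (\'"+"\', \'".join(range_list)+"\')"
--         else:
--             range_list = [str(iElement) for iElement in range_list]
--             return field_name +" IN ("+', '.join(range_list)+")"
--     else:
--         if is_str:
--             SQLStr = field_name+" IN (\'"+"\', \'".join(range_list[0:max_num])+"\')"
--             i = max_num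
--             while i<nStr:
--                 SQLStr += " OR "+field_name+" IN (\'"+"\', \'".join(range_list[i:i+max_num])+"\')"
--                 i = i+max_num
--         else:
--             range_list = [str(iElement) for iElement in range_list]
--             SQLStr = field_name+" IN ("+", ".join(range_list[0:max_num])+")"
--             i = max_num
--             while i<nStr:
--                 SQLStr += " OR "+field_name+" IN ("+", ".join(range_list[i:i+max_num])+")"
--                 i = i+max_num
--         return SQLStr
-- ===== SOURCE B (Python) =====
-- def genSQLInCondition(field_name, range_list, is_str=True, max_num=1000):
--     quote = "'" if is_str else ""
--     opening = field_name + " IN (" + quote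
--     closing = quote + ")"
--     sep = quote + ", " + quote
--     parts = [opening]
--     for i, x in enumerate(range_list):
--         if i:
--             parts.append(closing + " OR " + opening if i % max_num == 0 else sep)
--         parts.append(x if is_str else str(x))
--     parts.append(closing)
--     return "".join(parts)
-- ===== Notes on version B (the rewrite author's own statement) =====
-- stated objective: simpler
-- what changed: Replaces A's slice-into-chunks-and-join algorithm with its duplicated small/large and str/non-str branches by one element-wise pass over enumerate(range_list) that chooses each element's separator (nothing, in-clause comma, or close-OR-reopen boundary) from its index modulo max_num, with quoting unified in a single quote variable.
import Mathlib
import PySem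

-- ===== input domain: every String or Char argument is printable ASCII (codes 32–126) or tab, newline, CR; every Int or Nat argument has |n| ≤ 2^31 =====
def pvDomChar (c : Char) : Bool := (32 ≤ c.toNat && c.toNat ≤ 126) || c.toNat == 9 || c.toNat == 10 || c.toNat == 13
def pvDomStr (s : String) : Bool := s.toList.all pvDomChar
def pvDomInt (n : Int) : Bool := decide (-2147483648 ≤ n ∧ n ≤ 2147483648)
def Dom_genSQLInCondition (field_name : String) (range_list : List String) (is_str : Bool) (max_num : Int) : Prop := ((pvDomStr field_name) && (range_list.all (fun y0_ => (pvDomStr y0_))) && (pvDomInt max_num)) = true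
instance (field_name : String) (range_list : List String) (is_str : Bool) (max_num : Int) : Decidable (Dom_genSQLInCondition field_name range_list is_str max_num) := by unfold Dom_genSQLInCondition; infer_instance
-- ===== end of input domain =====

-- B replaces A's slice-the-list-into-chunks-and-join algorithm (with its duplicated
-- small/large and str/non-str branches) by a single element-wise pass that picks each
-- element's separator from its index (i % max_num) and unifies quoting via one variable;
-- objective: simpler (same cost).

-- ===== PORT A =====
-- A's first while loop ('is_str' branch); the '0 < max_num' conjunct only totalizes the loop
-- (Python diverges there), it never fires on inputs satisfying Pre_.
def genSQLInCondition_loopS (field_name : String) (range_list : List String) (nStr : Int) (max_num : Int) (i : Int) (SQLStr : String) : String :=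
  if h : i < nStr ∧ 0 < max_num then
    genSQLInCondition_loopS field_name range_list nStr max_num (i + max_num)
      (SQLStr ++ " OR " ++ field_name ++ " IN ('" ++
        PySem.Str.join "', '" (PySem.List.slice range_list (some i) (some (i + max_num))) ++ "')")
  else SQLStr
termination_by (nStr - i).toNat
decreasing_by omega

-- A's second while loop (non-'is_str' branch), over the already str()-mapped list.
def genSQLInCondition_loopN (field_name : String) (range_list : List String) (nStr : Int) (max_num : Int) (i : Int) (SQLStr : String) : String :=
  if h : i < nStr ∧ 0 < max_num then
    genSQLInCondition_loopN field_name range_list nStr max_num (i + max_num)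
      (SQLStr ++ " OR " ++ field_name ++ " IN (" ++
        PySem.Str.join ", " (PySem.List.slice range_list (some i) (some (i + max_num))) ++ ")")
  else SQLStr
termination_by (nStr - i).toNat
decreasing_by omega

-- str(iElement) on a str is the identity, so the comprehension is ported as List.map (fun x => x).
def genSQLInCondition (field_name : String) (range_list : List String) (is_str : Bool) (max_num : Int) : String :=
  let nStr : Int := range_list.length
  if nStr ≤ max_num then
    if is_str then
      field_name ++ " IN ('" ++ PySem.Str.join "', '" range_list ++ "')"
    else
      field_name ++ " IN (" ++ PySem.Str.join ", " (range_list.map (fun iElement => iElement)) ++ ")"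
  else
    if is_str then
      genSQLInCondition_loopS field_name range_list nStr max_num max_num
        (field_name ++ " IN ('" ++
          PySem.Str.join "', '" (PySem.List.slice range_list (some 0) (some max_num)) ++ "')")
    else
      genSQLInCondition_loopN field_name (range_list.map (fun iElement => iElement)) nStr max_num max_num
        (field_name ++ " IN (" ++
          PySem.Str.join ", " (PySem.List.slice (range_list.map (fun iElement => iElement)) (some 0) (some max_num)) ++ ")")

-- ===== PORT B =====
-- One pass over enumerate(range_list): each element is preceded by nothing (i == 0), by a
-- close-OR-reopen boundary (i % max_num == 0) or by the in-clause separator; str(x) on a str is x.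
def genSQLInCondition_alt (field_name : String) (range_list : List String) (is_str : Bool) (max_num : Int) : String :=
  let quote := if is_str then "'" else ""
  let opening := field_name ++ " IN (" ++ quote
  let closing := quote ++ ")"
  let sep := quote ++ ", " ++ quote
  let parts := (PySem.List.enumerate range_list 0).foldl
    (fun parts ix =>
      (if ix.1 ≠ 0 then
        parts ++ [if PySem.Int.mod ix.1 max_num = 0 then closing ++ " OR " ++ opening else sep]
      else parts) ++ [ix.2])
    [opening]
  PySem.Str.join "" (parts ++ [closing])

-- ===== PRECONDITION & SPEC =====
-- Pre_ is exactly the set of inputs on which the Python A terminates: with max_num ≤ 0 A's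
-- while loop diverges on every nonempty list (and on the empty list for negative max_num);
-- the only non-positive case A returns on, range_list = [] with max_num = 0, stays inside Pre_.
def Pre_genSQLInCondition (field_name : String) (range_list : List String) (is_str : Bool) (max_num : Int) : Prop :=
  0 < max_num ∨ (range_list = [] ∧ max_num = 0)
instance (field_name : String) (range_list : List String) (is_str : Bool) (max_num : Int) : Decidable (Pre_genSQLInCondition field_name range_list is_str max_num) := by unfold Pre_genSQLInCondition; infer_instance

def pvWitness_genSQLInCondition : String × List String × Bool × Int := ("f", ["a", "b", "c"], true, 2)

def Spec_genSQLInCondition (field_name : String) (range_list : List String) (is_str : Bool) (max_num : Int) (out : String) : Prop := out = genSQLInCondition_alt field_name range_list is_str max_num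
instance (field_name : String) (range_list : List String) (is_str : Bool) (max_num : Int) (out : String) : Decidable (Spec_genSQLInCondition field_name range_list is_str max_num out) := by unfold Spec_genSQLInCondition; infer_instance

-- ===== CLAIM (what is proved, stated in full; the proofs are below) =====
def Claim_equal_genSQLInCondition : Prop := ∀ (field_name : String) (range_list : List String) (is_str : Bool) (max_num : Int), Dom_genSQLInCondition field_name range_list is_str max_num → Pre_genSQLInCondition field_name range_list is_str max_num → Spec_genSQLInCondition field_name range_list is_str max_num (genSQLInCondition field_name range_list is_str max_num)

-- ===== LEMMAS AND PROOFS =====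

-- B's pass, rephrased on a single string accumulator (proof-side helper).
def pvFstr (bv sep : String) (m : Int) : Int → List String → String → String
  | _, [], acc => acc
  | i, x :: xs, acc =>
      pvFstr bv sep m (i + 1) xs
        (if i ≠ 0 then acc ++ (if PySem.Int.mod i m = 0 then bv else sep) ++ x else acc ++ x)

theorem str_join_nil (sep : String) : PySem.Str.join sep ([] : List String) = "" := by
  rw [← String.toList_inj, PySem.Str.toList_join]
  simp [PySem.Chars.join_nil]

theorem str_join_singleton (sep c : String) : PySem.Str.join sep [c] = c := by
  rw [← String.toList_inj, PySem.Str.toList_join]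
  simp [PySem.Chars.join_singleton]

theorem str_join_cons_cons (sep p q : String) (rest : List String) :
    PySem.Str.join sep (p :: q :: rest) = p ++ sep ++ PySem.Str.join sep (q :: rest) := by
  rw [← String.toList_inj, PySem.Str.toList_join]
  simp [PySem.Chars.join_cons_cons, PySem.Str.toList_join]

theorem str_join_empty_cons (p : String) (rest : List String) :
    PySem.Str.join "" (p :: rest) = p ++ PySem.Str.join "" rest := by
  cases rest with
  | nil => rw [str_join_singleton, str_join_nil]; simp
  | cons q r => rw [str_join_cons_cons]; simp

theorem str_join_empty_append_singleton (parts : List String) (s : String) :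
    PySem.Str.join "" (parts ++ [s]) = PySem.Str.join "" parts ++ s := by
  induction parts with
  | nil => rw [List.nil_append, str_join_singleton, str_join_nil]; simp
  | cons p rest ih =>
      rw [List.cons_append, str_join_empty_cons, str_join_empty_cons, ih, String.append_assoc]

theorem str_join_empty_append_pair (parts : List String) (s t : String) :
    PySem.Str.join "" (parts ++ [s, t]) = PySem.Str.join "" parts ++ (s ++ t) := by
  rw [show parts ++ [s, t] = (parts ++ [s]) ++ [t] by simp,
    str_join_empty_append_singleton, str_join_empty_append_singleton, String.append_assoc]

-- B's part-list fold, flattened by "".join, is pvFstr.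
theorem join_parts_eq_pvFstr (bv sep : String) (m : Int) :
    ∀ (xs : List String) (i0 : Int) (parts : List String),
    PySem.Str.join "" ((PySem.List.enumerate xs i0).foldl
      (fun parts ix =>
        (if ix.1 ≠ 0 then
          parts ++ [if PySem.Int.mod ix.1 m = 0 then bv else sep]
        else parts) ++ [ix.2]) parts)
      = pvFstr bv sep m i0 xs (PySem.Str.join "" parts) := by
  intro xs
  induction xs with
  | nil => intro i0 parts; rw [PySem.List.enumerate_nil]; rfl
  | cons x xs ih =>
      intro i0 parts
      rw [PySem.List.enumerate_cons, List.foldl_cons, ih]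
      show _ = pvFstr bv sep m (i0 + 1) xs _
      congr 1
      by_cases h0 : i0 ≠ 0
      · by_cases hmz : PySem.Int.mod i0 m = 0 <;>
          simp [h0, hmz, str_join_empty_append_pair, String.append_assoc]
      · simp [h0, str_join_empty_append_singleton]

-- range(a, b, s) with positive step s: empty and cons characterisations.
theorem pyRange_pos_eq_nil {a b s : Int} (hs : 0 < s) (h : b ≤ a) :
    PySem.List.pyRange a b s = [] := by
  rw [PySem.List.pyRange_of_pos _ _ hs]
  simp [not_lt.2 h]

theorem pyRange_pos_cons {a b s : Int} (hs : 0 < s) (h : a < b) :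
    PySem.List.pyRange a b s = a :: PySem.List.pyRange (a + s) b s := by
  rw [PySem.List.pyRange_of_pos _ _ hs, PySem.List.pyRange_of_pos _ _ hs]
  have h1 : (b - a + s - 1) / s = (b - a - 1) / s + 1 := by
    have e : b - a + s - 1 = (b - a - 1) + 1 * s := by ring
    rw [e, Int.add_mul_ediv_right _ _ (ne_of_gt hs)]
  have hq0 : 0 ≤ (b - a - 1) / s := Int.ediv_nonneg (by omega) hs.le
  have key : (if a < b then ((b - a + s - 1) / s).toNat else 0)
      = (if a + s < b then ((b - (a + s) + s - 1) / s).toNat else 0) + 1 := by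
    by_cases hab : a + s < b
    · have e2 : b - (a + s) + s - 1 = b - a - 1 := by ring
      simp only [if_pos h, if_pos hab, e2, h1]
      omega
    · have hz : (b - a - 1) / s = 0 := Int.ediv_eq_zero_of_lt (by omega) (by omega)
      simp only [if_pos h, if_neg hab, h1, hz]
      decide
  rw [key, List.range_succ_eq_map]
  simp only [List.map_cons, List.map_map, Nat.cast_zero, mul_zero, add_zero, List.cons.injEq,
    true_and]
  apply List.map_congr_left
  intro k _
  simp [Nat.succ_eq_add_one]
  ring

-- prefix comes out of a separator-fold
theorem foldl_sep_prefix (sep p : String) : ∀ (xs : List String) (a : String),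
    xs.foldl (fun acc x => acc ++ sep ++ x) (p ++ a)
      = p ++ xs.foldl (fun acc x => acc ++ sep ++ x) a := by
  intro xs
  induction xs with
  | nil => intro a; rfl
  | cons y ys ih =>
      intro a
      simp only [List.foldl_cons]
      have e : p ++ a ++ sep ++ y = p ++ (a ++ sep ++ y) := by
        simp [String.append_assoc]
      rw [e, ih]

-- "sep.join(c :: cs)" as a fold
theorem str_join_eq_foldl (sep : String) : ∀ (cs : List String) (c : String),
    PySem.Str.join sep (c :: cs) = cs.foldl (fun acc x => acc ++ sep ++ x) c := by
  intro cs
  induction cs with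
  | nil => intro c; exact str_join_singleton sep c
  | cons x xs ih =>
      intro c
      rw [str_join_cons_cons, ih x, List.foldl_cons]
      rw [← foldl_sep_prefix sep (c ++ sep) xs x, String.append_assoc]

theorem loopS_eq_foldl (field_name : String) (range_list : List String) (nStr max_num : Int)
    (hm : 0 < max_num) : ∀ (i : Int) (acc : String),
    genSQLInCondition_loopS field_name range_list nStr max_num i acc
      = (PySem.List.pyRange i nStr max_num).foldl
          (fun a j => a ++ " OR " ++ field_name ++ " IN ('" ++
            PySem.Str.join "', '" (PySem.List.slice range_list (some j) (some (j + max_num))) ++ "')") acc := by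
  intro i acc
  fun_induction genSQLInCondition_loopS field_name range_list nStr max_num i acc with
  | case1 i acc h ih =>
      rw [pyRange_pos_cons hm h.1, List.foldl_cons, ih]
  | case2 i acc h =>
      rw [pyRange_pos_eq_nil hm (by omega), List.foldl_nil]

theorem loopN_eq_foldl (field_name : String) (range_list : List String) (nStr max_num : Int)
    (hm : 0 < max_num) : ∀ (i : Int) (acc : String),
    genSQLInCondition_loopN field_name range_list nStr max_num i acc
      = (PySem.List.pyRange i nStr max_num).foldl
          (fun a j => a ++ " OR " ++ field_name ++ " IN (" ++
            PySem.Str.join ", " (PySem.List.slice range_list (some j) (some (j + max_num))) ++ ")") acc := by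
  intro i acc
  fun_induction genSQLInCondition_loopN field_name range_list nStr max_num i acc with
  | case1 i acc h ih =>
      rw [pyRange_pos_cons hm h.1, List.foldl_cons, ih]
  | case2 i acc h =>
      rw [pyRange_pos_eq_nil hm (by omega), List.foldl_nil]

theorem emod_add_self (i m : Int) : (i + m) % m = i % m := by
  have h := Int.add_mul_emod_self_left (a := i) (b := m) (c := 1)
  rw [mul_one] at h
  exact h

theorem emod_succ (i m : Int) : (i + 1) % m = (i % m + 1) % m := by
  conv_lhs => rw [show i + 1 = i % m + 1 + m * (i / m) from by
    have h := Int.mul_ediv_add_emod i m; linarith]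
  rw [Int.add_mul_emod_self_left]

-- pvFstr across a run of non-boundary indices is a separator fold
theorem pvFstr_inner (bv sep : String) (m : Int) (hm : 0 < m) :
    ∀ (zs rest : List String) (i : Int) (acc : String), 0 ≤ i →
      i % m + (zs.length : Int) ≤ m → (0 < i % m ∨ zs = []) →
    pvFstr bv sep m i (zs ++ rest) acc
      = pvFstr bv sep m (i + zs.length) rest
          (zs.foldl (fun a y => a ++ sep ++ y) acc) := by
  intro zs
  induction zs with
  | nil => intro rest i acc _ _ _; simp
  | cons y ys ih =>
      intro rest i acc hi0 hlen hr
      have hrm : 0 < i % m := hr.resolve_right (by simp)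
      have hine : i ≠ 0 := by intro h; rw [h] at hrm; simp at hrm
      have hmodne : PySem.Int.mod i m ≠ 0 := by
        rw [PySem.Int.mod_eq_emod_of_pos hm]; omega
      have hlen' : i % m + 1 + (ys.length : Int) ≤ m := by
        have h := hlen; simp only [List.length_cons] at h; push_cast at h; omega
      have hcond1 : (i + 1) % m + (ys.length : Int) ≤ m := by
        cases ys with
        | nil =>
            have h1 : (i + 1) % m < m := Int.emod_lt_of_pos _ hm
            simp; omega
        | cons z zs' =>
            have hlt : i % m + 1 < m := by
              have h := hlen'; simp only [List.length_cons] at h ⊢; push_cast at h ⊢; omega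
            have he : (i + 1) % m = i % m + 1 := by
              rw [emod_succ, Int.emod_eq_of_lt (by omega) hlt]
            rw [he]; omega
      have hcond2 : 0 < (i + 1) % m ∨ ys = [] := by
        cases ys with
        | nil => right; rfl
        | cons z zs' =>
            left
            have hlt : i % m + 1 < m := by
              have h := hlen'; simp only [List.length_cons] at h; push_cast at h; omega
            rw [emod_succ, Int.emod_eq_of_lt (by omega) hlt]; omega
      show pvFstr bv sep m (i + 1) (ys ++ rest) _ = _
      rw [if_pos hine, if_neg hmodne, ih rest (i + 1) _ (by omega) hcond1 hcond2,
        List.foldl_cons]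
      congr 1
      simp only [List.length_cons]
      push_cast
      ring

-- pvFstr from a chunk boundary equals A's while-loop fold (generic in opening/closing/sep)
theorem pvFstr_chunks (opn cls sep : String) (m : Int) (hm : 0 < m) (xs : List String) :
    ∀ (k : Nat) (i : Int) (acc : String), ((xs.length : Int) - i).toNat ≤ k →
      0 < i → i % m = 0 →
    pvFstr (cls ++ " OR " ++ opn) sep m i (xs.drop i.toNat) acc ++ cls
      = (PySem.List.pyRange i (xs.length : Int) m).foldl
          (fun a j => a ++ " OR " ++ opn ++
            PySem.Str.join sep (PySem.List.slice xs (some j) (some (j + m))) ++ cls)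
          (acc ++ cls) := by
  intro k
  induction k with
  | zero =>
      intro i acc hk hi0 hmod
      have hend : (xs.length : Int) ≤ i := by omega
      rw [List.drop_eq_nil_of_le (by omega), pyRange_pos_eq_nil hm hend]
      rfl
  | succ k ihk =>
      intro i acc hk hi0 hmod
      by_cases hend : (xs.length : Int) ≤ i
      · rw [List.drop_eq_nil_of_le (by omega), pyRange_pos_eq_nil hm hend]
        rfl
      · have hlt : i < (xs.length : Int) := by omega
        have hsl : PySem.List.slice xs (some i) (some (i + m)) = (xs.drop i.toNat).take m.toNat := by
          rw [PySem.List.slice_toNat _ (by omega) (by omega)]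
          congr 1
          omega
        obtain ⟨x, c', hc⟩ : ∃ x c', (xs.drop i.toNat).take m.toNat = x :: c' := by
          cases htk : (xs.drop i.toNat).take m.toNat with
          | nil =>
              exfalso
              have hpos : 0 < ((xs.drop i.toNat).take m.toNat).length := by
                rw [List.length_take, List.length_drop]; omega
              simp [htk] at hpos
          | cons a b => exact ⟨a, b, rfl⟩
        have hceq : (x :: c').length = min m.toNat (xs.length - i.toNat) := by
          have h1 := congrArg List.length hc
          simpa [List.length_take, List.length_drop] using h1.symm
        have hdecomp : xs.drop i.toNat = (x :: c') ++ xs.drop (i + m).toNat := by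
          rw [← hc]
          have h2 : xs.drop (i + m).toNat = (xs.drop i.toNat).drop m.toNat := by
            rw [List.drop_drop]; congr 1; omega
          rw [h2, List.take_append_drop]
        have hclen : (c'.length : Int) ≤ m - 1 := by
          simp only [List.length_cons] at hceq; omega
        rw [hdecomp]
        have hine : i ≠ 0 := by omega
        have hmodz : PySem.Int.mod i m = 0 := by
          rw [PySem.Int.mod_eq_emod_of_pos hm]; exact hmod
        show pvFstr _ sep m (i + 1) (c' ++ _) _ ++ cls = _
        rw [if_pos hine, if_pos hmodz]
        have hs1 : (i + 1) % m = 1 % m := by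
          rw [emod_succ, hmod]; norm_num
        have hinner := pvFstr_inner (cls ++ " OR " ++ opn) sep m hm c' (xs.drop (i + m).toNat)
          (i + 1) (acc ++ (cls ++ " OR " ++ opn) ++ x) (by omega)
          (by
            by_cases h1 : m = 1
            · have : c'.length = 0 := by omega
              subst h1
              simp [this]
            · have h2 : (1 : Int) % m = 1 := Int.emod_eq_of_lt (by omega) (by omega)
              rw [hs1, h2]; omega)
          (by
            by_cases h1 : m = 1
            · right
              have : c'.length = 0 := by omega
              exact List.length_eq_zero_iff.mp this
            · left
              have h2 : (1 : Int) % m = 1 := Int.emod_eq_of_lt (by omega) (by omega)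
              rw [hs1, h2]; omega)
        rw [hinner]
        have haccsh : c'.foldl (fun a y => a ++ sep ++ y) (acc ++ (cls ++ " OR " ++ opn) ++ x) ++ cls
            = acc ++ cls ++ " OR " ++ opn ++
                PySem.Str.join sep (PySem.List.slice xs (some i) (some (i + m))) ++ cls := by
          rw [hsl, hc, str_join_eq_foldl]
          have e : acc ++ (cls ++ " OR " ++ opn) ++ x
              = (acc ++ cls ++ " OR " ++ opn) ++ x := by simp [String.append_assoc]
          rw [e, foldl_sep_prefix]
        rw [pyRange_pos_cons hm hlt, List.foldl_cons]
        by_cases hfull : i + m < (xs.length : Int)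
        · have hidx : i + 1 + (c'.length : Int) = i + m := by
            simp only [List.length_cons] at hceq; omega
          rw [show (i + 1 + (c'.length : Nat) : Int) = i + m from by omega]
          rw [ihk (i + m) _ (by omega) (by omega) (by rw [emod_add_self]; exact hmod), haccsh]
        · have hrest : xs.drop (i + m).toNat = [] := List.drop_eq_nil_of_le (by omega)
          rw [hrest, pyRange_pos_eq_nil hm (by omega), List.foldl_nil]
          show c'.foldl _ _ ++ cls = _
          rw [haccsh]

-- pvFstr over the whole list (generic in opening/closing/sep) = A's shape
theorem pvFstr_top (opn cls sep : String) (m : Int) (hm : 0 < m) (xs : List String) :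
    pvFstr (cls ++ " OR " ++ opn) sep m 0 xs opn ++ cls
      = if (xs.length : Int) ≤ m then opn ++ PySem.Str.join sep xs ++ cls
        else (PySem.List.pyRange m (xs.length : Int) m).foldl
            (fun a j => a ++ " OR " ++ opn ++
              PySem.Str.join sep (PySem.List.slice xs (some j) (some (j + m))) ++ cls)
            (opn ++ PySem.Str.join sep (PySem.List.slice xs (some 0) (some m)) ++ cls) := by
  cases hxs : xs with
  | nil =>
      rw [if_pos (by simp; omega)]
      show opn ++ cls = _
      rw [str_join_nil]
      simp
  | cons x0 xs0 =>
      rw [← hxs]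
      have hne : xs ≠ [] := by rw [hxs]; simp
      obtain ⟨x, c', hc⟩ : ∃ x c', xs.take m.toNat = x :: c' := by
        cases htk : xs.take m.toNat with
        | nil =>
            exfalso
            have h2 : xs.length ≠ 0 := by
              intro h; exact hne (List.length_eq_zero_iff.mp h)
            have hpos : 0 < (xs.take m.toNat).length := by
              rw [List.length_take]; omega
            simp [htk] at hpos
        | cons a b => exact ⟨a, b, rfl⟩
      have hceq : (x :: c').length = min m.toNat xs.length := by
        have h1 := congrArg List.length hc
        simpa [List.length_take] using h1.symm
      have hclen : (c'.length : Int) ≤ m - 1 := by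
        simp only [List.length_cons] at hceq; omega
      have hdecomp0 : xs = (x :: c') ++ xs.drop m.toNat := by
        rw [← hc, List.take_append_drop]
      have hsl : PySem.List.slice xs (some 0) (some m) = x :: c' := by
        rw [PySem.List.slice_toNat _ (by omega) (by omega), ← hc]
        simp
      conv_lhs => rw [hdecomp0]
      show pvFstr (cls ++ " OR " ++ opn) sep m (0 + 1) (c' ++ _) (opn ++ x) ++ cls = _
      have hinner := pvFstr_inner (cls ++ " OR " ++ opn) sep m hm c' (xs.drop m.toNat)
        1 (opn ++ x) (by omega)
        (by
          by_cases h1 : m = 1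
          · have : c'.length = 0 := by omega
            subst h1; simp [this]
          · have h2 : (1 : Int) % m = 1 := Int.emod_eq_of_lt (by omega) (by omega)
            rw [h2]; omega)
        (by
          by_cases h1 : m = 1
          · right
            have : c'.length = 0 := by omega
            exact List.length_eq_zero_iff.mp this
          · left
            have h2 : (1 : Int) % m = 1 := Int.emod_eq_of_lt (by omega) (by omega)
            rw [h2]; omega)
      rw [show (0 : Int) + 1 = 1 from by norm_num, hinner]
      have hfold : c'.foldl (fun a y => a ++ sep ++ y) (opn ++ x)
          = opn ++ PySem.Str.join sep (x :: c') := by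
        rw [foldl_sep_prefix, str_join_eq_foldl]
      by_cases hsmall : (xs.length : Int) ≤ m
      · rw [if_pos hsmall]
        have hrest : xs.drop m.toNat = [] := List.drop_eq_nil_of_le (by omega)
        have hall : x :: c' = xs := by
          rw [← hc]
          exact List.take_of_length_le (by omega)
        rw [hrest]
        show c'.foldl _ _ ++ cls = _
        rw [hfold, hall]
      · rw [if_neg hsmall]
        have hidx : (1 + (c'.length : Nat) : Int) = m := by
          simp only [List.length_cons] at hceq; omega
        rw [hidx]
        rw [pvFstr_chunks opn cls sep m hm xs ((xs.length : Int) - m).toNat m _ (by omega)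
          (by omega) Int.emod_self]
        rw [hfold, hsl]

-- ===== VERDICT (by name: the statement is the Claim_ definition above) =====
theorem genSQLInCondition_spec : Claim_equal_genSQLInCondition := by
  intro field_name xs is_str m _ hpre
  unfold Spec_genSQLInCondition
  -- B flattened to pvFstr
  have hB : genSQLInCondition_alt field_name xs is_str m
      = (let quote := if is_str then "'" else ""
         pvFstr ((quote ++ ")") ++ " OR " ++ (field_name ++ " IN (" ++ quote))
           (quote ++ ", " ++ quote) m 0 xs (field_name ++ " IN (" ++ quote) ++ (quote ++ ")")) := by
    simp only [genSQLInCondition_alt]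
    rw [str_join_empty_append_singleton, join_parts_eq_pvFstr, str_join_singleton]
  rcases hpre with hm | ⟨hnil, hm0⟩
  · -- main case: 0 < m
    rw [hB]
    cases is_str with
    | true =>
        simp only [if_pos]
        rw [show field_name ++ " IN (" ++ "'" = field_name ++ " IN ('" from by
            rw [String.append_assoc, show (" IN (" : String) ++ "'" = " IN ('" from rfl],
          show ("'" : String) ++ ")" = "')" from rfl,
          show ("'" : String) ++ ", " ++ "'" = "', '" from rfl]
        rw [pvFstr_top (field_name ++ " IN ('") "')" "', '" m hm xs]
        unfold genSQLInCondition
        simp only [if_pos]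
        by_cases hle : (xs.length : Int) ≤ m
        · rw [if_pos hle, if_pos hle]
        · rw [if_neg hle, if_neg hle, loopS_eq_foldl field_name xs _ m hm]
          congr 1
          funext a j
          simp [String.append_assoc]
    | false =>
        simp only [Bool.false_eq_true, if_false]
        rw [show (("" : String) ++ ")") = ")" from rfl,
          show (("" : String) ++ ", " ++ "") = ", " from rfl]
        rw [show field_name ++ " IN (" ++ "" = field_name ++ " IN (" from by simp]
        rw [pvFstr_top (field_name ++ " IN (") ")" ", " m hm xs]
        unfold genSQLInCondition
        simp only [Bool.false_eq_true, if_false, List.map_id']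
        by_cases hle : (xs.length : Int) ≤ m
        · rw [if_pos hle, if_pos hle]
        · rw [if_neg hle, if_neg hle, loopN_eq_foldl field_name xs _ m hm]
          congr 1
          funext a j
          simp [String.append_assoc]
  · -- corner inside Pre_: range_list = [] with max_num = 0 (A's small branch)
    subst hnil
    subst hm0
    rw [hB]
    cases is_str with
    | true =>
        show genSQLInCondition field_name [] true 0
            = pvFstr _ _ 0 0 [] _ ++ _
        unfold genSQLInCondition
        simp only [if_pos, List.length_nil, Nat.cast_zero, le_refl]
        show field_name ++ " IN ('" ++ PySem.Str.join "', '" [] ++ "')" = _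
        rw [str_join_nil]
        show _ = field_name ++ " IN (" ++ "'" ++ ("'" ++ ")")
        simp only [String.append_assoc]
        rfl
    | false =>
        show genSQLInCondition field_name [] false 0
            = pvFstr _ _ 0 0 [] _ ++ _
        unfold genSQLInCondition
        simp only [Bool.false_eq_true, if_false, List.length_nil, Nat.cast_zero, le_refl,
          List.map_nil]
        show field_name ++ " IN (" ++ PySem.Str.join ", " [] ++ ")" = _
        rw [str_join_nil]
        show _ = field_name ++ " IN (" ++ "" ++ ("" ++ ")")
        simp only [String.append_assoc]
        rfl
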